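-- pv_equiv track=rewrite | github.com/opennotes-ai/opennotes | opennotes-server/tests/unit/llm_config/test_migration_4d7edc118a2e_audit.py | _simulate_upgrade
-- ===== SOURCE A (Python) =====
-- LITELLM_TO_PYDANTIC_PROVIDERS = {
--     "vertex_ai": "google-vertex",
--     "gemini": "google-gla",
-- }
--
-- def _simulate_upgrade(model_name: str) -> str:
--     """Pure-Python simulation of the migration's upgrade SQL logic.
--
--     Mirrors the two-phase SQL in 4d7edc118a2e exactly:
--     1. Provider translation for vertex_ai and gemini prefixes
--     2. Generic slash-to-colon for remaining rows
--     """
--     if ":" in model_name: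
--         return model_name
--
--     for litellm_provider, pydantic_provider in LITELLM_TO_PYDANTIC_PROVIDERS.items():
--         if model_name.startswith(f"{litellm_provider}/"):
--             first_slash = model_name.index("/")
--             return f"{pydantic_provider}:{model_name[first_slash + 1 :]}"
--
--     if "/" in model_name:
--         first_slash = model_name.index("/")
--         return f"{model_name[:first_slash]}:{model_name[first_slash + 1 :]}"
--
--     return model_name
-- ===== SOURCE B (Python) =====
-- LITELLM_TO_PYDANTIC_PROVIDERS = {
--     "vertex_ai": "google-vertex",
--     "gemini": "google-gla",
-- }
--
-- def _simulate_upgrade(model_name: str) -> str: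
--     if ":" in model_name:
--         return model_name
--     prefix, sep, rest = model_name.partition("/")
--     if not sep:
--         return model_name
--     mapped = LITELLM_TO_PYDANTIC_PROVIDERS.get(prefix, prefix)
--     return f"{mapped}:{rest}"
-- ===== Notes on version B (the rewrite author's own statement) =====
-- stated objective: simpler
-- what changed: Replaces the per-provider startswith loop plus a separate generic slash branch with one partition at the first slash followed by a single dict.get(prefix, prefix) lookup.
import Mathlib
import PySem

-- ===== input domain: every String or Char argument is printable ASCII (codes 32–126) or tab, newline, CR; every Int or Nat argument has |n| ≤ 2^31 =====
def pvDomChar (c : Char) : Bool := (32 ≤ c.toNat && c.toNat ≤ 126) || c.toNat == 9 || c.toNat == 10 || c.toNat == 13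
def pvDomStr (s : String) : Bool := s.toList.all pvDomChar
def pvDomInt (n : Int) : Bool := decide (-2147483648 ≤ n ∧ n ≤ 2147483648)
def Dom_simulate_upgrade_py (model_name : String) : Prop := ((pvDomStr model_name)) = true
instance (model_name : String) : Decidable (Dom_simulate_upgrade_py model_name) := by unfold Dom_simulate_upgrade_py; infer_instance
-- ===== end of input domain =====

-- B replaces A's per-provider startswith loop plus the separate generic slash branch by one
-- partition at the first slash followed by a single dict lookup (objective: simpler).

-- ===== PORT A =====
-- LITELLM_TO_PYDANTIC_PROVIDERS.items(), as the list of (litellm, pydantic) pairs, on char lists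
def pvProvidersA : List (List Char × List Char) :=
  [("vertex_ai".toList, "google-vertex".toList), ("gemini".toList, "google-gla".toList)]

-- the 'for litellm_provider, pydantic_provider in … .items(): if model_name.startswith(…): return …' loop;
-- model_name.index("/") is ported as PySem.Chars.find (exact here: the startswith guard guarantees "/" occurs)
def pvLoopA (cs : List Char) : List (List Char × List Char) → Option (List Char)
  | [] => none
  | (lp, pp) :: rest =>
    if PySem.Chars.startswith cs (lp ++ ['/']) then
      let fs := PySem.Chars.find cs ['/']
      some (pp ++ ':' :: PySem.Chars.slice cs (some (fs + 1)) none)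
    else pvLoopA cs rest

def simulate_upgrade_py (model_name : String) : String :=
  let cs := model_name.toList
  if PySem.Chars.isIn [':'] cs then model_name
  else
    match pvLoopA cs pvProvidersA with
    | some r => String.ofList r
    | none =>
      if PySem.Chars.isIn ['/'] cs then
        let fs := PySem.Chars.find cs ['/']
        String.ofList (PySem.Chars.slice cs none (some fs) ++ ':' :: PySem.Chars.slice cs (some (fs + 1)) none)
      else model_name

-- ===== PORT B =====
def pvProvMapB : PySem.Dict (List Char) (List Char) :=
  PySem.Dict.ofList [("vertex_ai".toList, "google-vertex".toList), ("gemini".toList, "google-gla".toList)]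

def simulate_upgrade_py_alt (model_name : String) : String :=
  let cs := model_name.toList
  if PySem.Chars.isIn [':'] cs then model_name
  else
    -- str.partition("/") ported by hand via takeWhile/dropWhile: exact for a single-char separator
    let prefx := cs.takeWhile (· ≠ '/')
    match cs.dropWhile (· ≠ '/') with
    | [] => model_name
    | _ :: rest => String.ofList (pvProvMapB.getD prefx prefx ++ ':' :: rest)

-- ===== PRECONDITION & SPEC =====
def Spec_simulate_upgrade_py (model_name : String) (out : String) : Prop := out = simulate_upgrade_py_alt model_name
instance (model_name : String) (out : String) : Decidable (Spec_simulate_upgrade_py model_name out) := by unfold Spec_simulate_upgrade_py; infer_instance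

-- ===== CLAIM (what is proved, stated in full; the proofs are below) =====
def Claim_equal_simulate_upgrade_py : Prop := ∀ (model_name : String), Dom_simulate_upgrade_py model_name → Spec_simulate_upgrade_py model_name (simulate_upgrade_py model_name)

-- ===== LEMMAS AND PROOFS =====

-- a prefix that ends in '/' forces a '/' in the string
theorem pv_slash_mem_of_prefix {lp cs : List Char} (h : (lp ++ ['/']) <+: cs) : '/' ∈ cs :=
  h.subset (by simp)

-- lp++'/' is a prefix of pre++'/'::tl (no '/' in lp or pre) iff lp = pre
theorem pv_prefix_slash_iff : ∀ (lp pre tl : List Char), '/' ∉ lp → '/' ∉ pre →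
    (((lp ++ ['/']) <+: (pre ++ '/' :: tl)) ↔ lp = pre)
  | [], [], _, _, _ => by simp
  | [], b :: pre', _, _, h2 => by
    have hb : b ≠ '/' := fun e => h2 (e ▸ List.mem_cons_self)
    simp only [List.nil_append, List.cons_append, List.cons_prefix_cons]
    constructor
    · rintro ⟨h, -⟩; exact absurd h.symm hb
    · intro h; exact absurd h (by simp)
  | a :: lp', [], _, h1, _ => by
    have ha : a ≠ '/' := fun e => h1 (e ▸ List.mem_cons_self)
    simp only [List.cons_append, List.nil_append, List.cons_prefix_cons]
    constructor
    · rintro ⟨h, -⟩; exact absurd h ha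
    · intro h; exact absurd h (by simp)
  | a :: lp', b :: pre', tl, h1, h2 => by
    simp only [List.cons_append, List.cons_prefix_cons]
    rw [pv_prefix_slash_iff lp' pre' tl (fun m => h1 (List.mem_cons_of_mem _ m))
      (fun m => h2 (List.mem_cons_of_mem _ m))]
    constructor
    · rintro ⟨rfl, rfl⟩; rfl
    · intro h; injection h with x y; exact ⟨x, y⟩

-- the first occurrence of '/' in pre ++ '/'::tl is at pre.length, when pre has no '/'
theorem pv_find_slash (pre tl : List Char) (h : '/' ∉ pre) :
    PySem.Chars.find (pre ++ '/' :: tl) ['/'] = (pre.length : Int) := by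
  have hinf : ['/'] <:+: (pre ++ '/' :: tl) := ⟨pre, tl, by simp⟩
  have hnn : 0 ≤ PySem.Chars.find (pre ++ '/' :: tl) ['/'] :=
    (PySem.Chars.find_nonneg_iff _ _).mpr hinf
  obtain ⟨hpref, hmin⟩ := PySem.Chars.find_spec (s := pre ++ '/' :: tl) (sub := ['/']) hnn
  set n := (PySem.Chars.find (pre ++ '/' :: tl) ['/']).toNat with hn
  have hple : ¬ pre.length < n := fun hlt => hmin pre.length hlt ⟨tl, by simp⟩
  have hnle : ¬ n < pre.length := by
    intro hlt
    rw [List.drop_append_of_le_length (le_of_lt hlt)] at hpref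
    obtain ⟨t, ht⟩ := hpref
    rcases hd : pre.drop n with _ | ⟨x, r⟩
    · have := congrArg List.length hd; simp at this; omega
    · rw [hd] at ht
      simp only [List.cons_append, List.cons.injEq] at ht
      have hx : '/' ∈ pre.drop n := by rw [hd, ← ht.1]; exact List.mem_cons_self
      exact h (List.mem_of_mem_drop hx)
  have : n = pre.length := by omega
  omega

theorem pv_no_slash_of_dropWhile_nil {cs : List Char} (h : cs.dropWhile (· ≠ '/') = []) :
    '/' ∉ cs := by
  intro hm
  have hall := List.takeWhile_append_dropWhile (p := (· ≠ '/')) (l := cs)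
  rw [h, List.append_nil] at hall
  have := List.mem_takeWhile_imp (l := cs) (p := (· ≠ '/')) (by rw [hall]; exact hm)
  simp at this

theorem pv_takeWhile_no_slash (cs : List Char) : '/' ∉ cs.takeWhile (· ≠ '/') := by
  intro hm
  have := List.mem_takeWhile_imp hm
  simp at this

theorem pv_dropWhile_head {cs d : List Char} {c : Char}
    (h : cs.dropWhile (· ≠ '/') = c :: d) : c = '/' := by
  have := List.head?_dropWhile_not (p := (· ≠ '/')) (l := cs)
  rw [h] at this
  simpa using this

-- ===== VERDICT (by name: the statement is the Claim_ definition above) =====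
theorem simulate_upgrade_py_spec : Claim_equal_simulate_upgrade_py := by
  intro s _
  unfold Spec_simulate_upgrade_py simulate_upgrade_py simulate_upgrade_py_alt
  set cs := s.toList with hcs
  by_cases hc : PySem.Chars.isIn [':'] cs
  · simp [hc]
  · simp only [hc, if_false, Bool.false_eq_true]
    rcases hdw : cs.dropWhile (· ≠ '/') with _ | ⟨c, tl⟩
    · -- no '/' in cs: loop returns none and the generic branch is skipped
      have hns : '/' ∉ cs := pv_no_slash_of_dropWhile_nil hdw
      have h1 : PySem.Chars.startswith cs ['v','e','r','t','e','x','_','a','i','/'] = false := by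
        rw [Bool.eq_false_iff]; intro hp
        exact hns (pv_slash_mem_of_prefix (lp := ['v','e','r','t','e','x','_','a','i'])
          ((PySem.Chars.startswith_iff _ _).mp hp))
      have h2 : PySem.Chars.startswith cs ['g','e','m','i','n','i','/'] = false := by
        rw [Bool.eq_false_iff]; intro hp
        exact hns (pv_slash_mem_of_prefix (lp := ['g','e','m','i','n','i'])
          ((PySem.Chars.startswith_iff _ _).mp hp))
      have hloop : pvLoopA cs pvProvidersA = none := by
        simp only [pvProvidersA, pvLoopA]
        rw [if_neg (by simp [h1]), if_neg (by simp [h2])]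
      have hni : PySem.Chars.isIn ['/'] cs = false := by
        rw [PySem.Chars.isIn_eq_false_iff]
        exact fun hinf => hns (hinf.subset (by simp))
      simp [hloop, hni]
    · -- cs = pre ++ '/' :: tl
      obtain rfl : c = '/' := pv_dropWhile_head hdw
      set pre := cs.takeWhile (· ≠ '/') with hpre
      have hsplit : cs = pre ++ '/' :: tl := by
        rw [hpre, ← hdw]; exact (List.takeWhile_append_dropWhile).symm
      have hnp : '/' ∉ pre := hpre ▸ pv_takeWhile_no_slash cs
      have hfind : PySem.Chars.find cs ['/'] = (pre.length : Int) := by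
        rw [hsplit]; exact pv_find_slash pre tl hnp
      have hsl1 : PySem.Chars.slice cs (some ((pre.length : Int) + 1)) none = tl := by
        have e : PySem.Chars.slice cs (some ((pre.length : Int) + 1)) none
            = cs.drop ((pre.length : Int) + 1).toNat := by
          rw [PySem.Chars.slice_eq_listSlice]; exact PySem.List.slice_from cs (by omega)
        rw [e, hsplit]
        have h1 : ((pre.length : Int) + 1).toNat = pre.length + 1 := by omega
        rw [h1, List.drop_append]
        have h2 : pre.length + 1 - pre.length = 1 := by omega
        simp [h2, List.drop_eq_nil_of_le]
      have hsl0 : PySem.Chars.slice cs none (some (pre.length : Int)) = pre := by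
        have e : PySem.Chars.slice cs none (some (pre.length : Int))
            = cs.take (pre.length : Int).toNat := by
          rw [PySem.Chars.slice_eq_listSlice]; exact PySem.List.slice_to cs (by omega)
        rw [e, hsplit]
        simp
      have hsw : ∀ lp : List Char, '/' ∉ lp →
          (PySem.Chars.startswith cs (lp ++ ['/']) = true ↔ lp = pre) := by
        intro lp hlp
        rw [PySem.Chars.startswith_iff, hsplit]
        exact pv_prefix_slash_iff lp pre tl hlp hnp
      have hvx : '/' ∉ "vertex_ai".toList := by decide
      have hgm : '/' ∉ "gemini".toList := by decide
      by_cases h1 : pre = "vertex_ai".toList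
      · have hs1 : PySem.Chars.startswith cs ['v','e','r','t','e','x','_','a','i','/'] = true :=
          (hsw _ hvx).mpr h1.symm
        simp only [pvProvidersA, pvLoopA]
        rw [if_pos (by exact hs1)]
        simp only [hfind, hsl1]
        have hd1 : pvProvMapB.getD "vertex_ai".toList "vertex_ai".toList = "google-vertex".toList := by decide
        rw [h1, hd1]
      by_cases h2 : pre = "gemini".toList
      · have hs1 : PySem.Chars.startswith cs ['v','e','r','t','e','x','_','a','i','/'] = false := by
          rw [Bool.eq_false_iff]; intro hp
          exact h1 (((hsw _ hvx).mp hp).symm)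
        have hs2 : PySem.Chars.startswith cs ['g','e','m','i','n','i','/'] = true :=
          (hsw _ hgm).mpr h2.symm
        simp only [pvProvidersA, pvLoopA]
        rw [if_neg (by simp [hs1]), if_pos (by exact hs2)]
        simp only [hfind, hsl1]
        have hd2 : pvProvMapB.getD "gemini".toList "gemini".toList = "google-gla".toList := by decide
        rw [h2, hd2]
      · have hs1 : PySem.Chars.startswith cs ['v','e','r','t','e','x','_','a','i','/'] = false := by
          rw [Bool.eq_false_iff]; intro hp
          exact h1 (((hsw _ hvx).mp hp).symm)
        have hs2 : PySem.Chars.startswith cs ['g','e','m','i','n','i','/'] = false := by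
          rw [Bool.eq_false_iff]; intro hp
          exact h2 (((hsw _ hgm).mp hp).symm)
        have hloop : pvLoopA cs pvProvidersA = none := by
          simp only [pvProvidersA, pvLoopA]
          rw [if_neg (by simp [hs1]), if_neg (by simp [hs2])]
        have hin : PySem.Chars.isIn ['/'] cs = true := by
          rw [PySem.Chars.isIn_iff_infix]
          exact ⟨pre, tl, by rw [hsplit]; simp⟩
        have hg : pvProvMapB.getD pre pre = pre := by
          have hm : pvProvMapB = PySem.Dict.mk
              [("vertex_ai".toList, "google-vertex".toList), ("gemini".toList, "google-gla".toList)] := by decide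
          have e1 : ("vertex_ai".toList == pre) = false :=
            beq_eq_false_iff_ne.mpr (fun e => h1 e.symm)
          have e2 : ("gemini".toList == pre) = false :=
            beq_eq_false_iff_ne.mpr (fun e => h2 e.symm)
          have hnone : pvProvMapB.get? pre = none := by
            rw [hm, PySem.Dict.get?_mk_cons, PySem.Dict.get?_mk_cons, e1, e2]
            simp [PySem.Dict.get?]
          simp [PySem.Dict.getD, hnone]
        simp only [hloop, hin, if_true, hfind, hsl0, hsl1, hg]
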